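-- pv_equiv track=rewrite | github.com/Gajuli/- | base-parameters.py | calculate_base_parameter
-- ===== SOURCE A (Python) =====
-- def calculate_base_parameter(data):
-- 	bp = 1
-- 	while True:
-- 		subsets = break_into_subsets(data, bp)
-- 		if find_twins(subsets):
-- 			bp += 1
-- 		else:
-- 			return bp
--
-- def break_into_subsets(data, length):
-- 	return [data[x:x+length] for x in range(len(data)-length+1)]
--
-- def find_twins(data):
-- 	for d in data:
-- 		if data.count(d) > 1:
-- 			return True
-- 	return False
-- ===== SOURCE B (Python) =====
-- def calculate_base_parameter(data):
--     n = len(data)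
--
--     def has_dup(length):
--         seen = set()
--         for i in range(n - length + 1):
--             sub = data[i:i + length]
--             if sub in seen:
--                 return True
--             seen.add(sub)
--         return False
--
--     lo, hi = 1, max(n, 1)
--     while lo < hi:
--         mid = (lo + hi) // 2
--         if has_dup(mid):
--             lo = mid + 1
--         else:
--             hi = mid
--     return lo
-- ===== Notes on version B (the rewrite author's own statement) =====
-- stated objective: faster
-- what changed: B binary-searches over the window length (uniqueness of fixed-length windows is monotone in the length) and detects duplicates per length with a hash set in one pass, instead of A's linear scan over lengths with a quadratic count-based twin search per length.
import Mathlib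
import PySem

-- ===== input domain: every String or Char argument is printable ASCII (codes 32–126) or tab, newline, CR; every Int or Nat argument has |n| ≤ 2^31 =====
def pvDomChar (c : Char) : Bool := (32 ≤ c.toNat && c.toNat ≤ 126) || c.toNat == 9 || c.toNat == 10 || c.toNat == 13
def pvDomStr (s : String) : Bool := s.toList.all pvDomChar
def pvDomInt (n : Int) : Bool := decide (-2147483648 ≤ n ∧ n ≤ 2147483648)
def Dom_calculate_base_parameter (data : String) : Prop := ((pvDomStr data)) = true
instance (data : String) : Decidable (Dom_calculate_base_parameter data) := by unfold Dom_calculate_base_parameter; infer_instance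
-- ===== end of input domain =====

-- B replaces A's linear scan over candidate lengths with O(n^2)-per-length duplicate
-- detection by a binary search over the length (uniqueness is monotone in the length)
-- with set-based duplicate detection; objective: faster (asymptotic).

-- ===== PORT A =====
-- break_into_subsets(data, length): [data[x:x+length] for x in range(len(data)-length+1)]
def pvBreakIntoSubsets (s : List Char) (length : Int) : List (List Char) :=
  (PySem.List.pyRange 0 ((s.length : Int) - length + 1) 1).map
    (fun x => PySem.List.slice s (some x) (some (x + length)))

-- find_twins(data): for d in data: if data.count(d) > 1: return True; return False
def pvFindTwins (l : List (List Char)) : Bool :=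
  l.any (fun d => 1 < l.count d)

-- termination fact for A's while-loop: a twin needs at least two subsets
theorem pvTwins_lt (s : List Char) (bp : Int)
    (h : pvFindTwins (pvBreakIntoSubsets s bp) = true) : bp < (s.length : Int) := by
  unfold pvFindTwins at h
  obtain ⟨d, hd, hc⟩ := List.any_eq_true.mp h
  have hcl : (pvBreakIntoSubsets s bp).count d ≤ (pvBreakIntoSubsets s bp).length :=
    List.count_le_length
  have h2 : 2 ≤ (pvBreakIntoSubsets s bp).length := by
    simp only [decide_eq_true_eq] at hc; omega
  unfold pvBreakIntoSubsets at h2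
  rw [List.length_map, PySem.List.length_pyRange_one] at h2
  omega

-- the 'while True: … bp += 1 … return bp' loop of A
def pvALoop (s : List Char) (bp : Int) : Int :=
  if h : pvFindTwins (pvBreakIntoSubsets s bp) = true then pvALoop s (bp + 1)
  else bp
termination_by ((s.length : Int) + 1 - bp).toNat
decreasing_by have := pvTwins_lt s bp h; omega

def calculate_base_parameter (data : String) : Int := pvALoop data.toList 1

-- ===== PORT B =====
-- has_dup(length): for i in range(n-length+1): sub = data[i:i+length]; if sub in seen: return True; seen.add(sub); return False
def pvHasDupGo (s : List Char) (L : Int) : List Int → PySem.Set (List Char) → Bool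
  | [], _seen => false
  | i :: rest, seen =>
    let sub := PySem.List.slice s (some i) (some (i + L))
    if PySem.Set.contains seen sub then true
    else pvHasDupGo s L rest (PySem.Set.add seen sub)

def pvHasDup (s : List Char) (L : Int) : Bool :=
  pvHasDupGo s L (PySem.List.pyRange 0 ((s.length : Int) - L + 1) 1) PySem.Set.empty

-- binary search: while lo < hi: mid = (lo+hi)//2; if has_dup(mid): lo = mid+1 else hi = mid
def pvBLoop (s : List Char) (lo hi : Int) : Int :=
  if h : lo < hi then
    let mid := PySem.Int.floordiv (lo + hi) 2
    if pvHasDup s mid then pvBLoop s (mid + 1) hi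
    else pvBLoop s lo mid
  else lo
termination_by (hi - lo).toNat
decreasing_by
  · have hb := PySem.Int.floordiv_two_mid_bounds (le_of_lt h)
    omega
  · have hlt : PySem.Int.floordiv (lo + hi) 2 < hi :=
      (PySem.Int.floordiv_lt_iff_lt_mul (a := lo + hi) (b := 2) (q := hi) (by omega)).mpr (by omega)
    omega

def calculate_base_parameter_alt (data : String) : Int :=
  pvBLoop data.toList 1 (max (data.toList.length : Int) 1)

-- ===== PRECONDITION & SPEC =====
def Spec_calculate_base_parameter (data : String) (out : Int) : Prop := out = calculate_base_parameter_alt data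
instance (data : String) (out : Int) : Decidable (Spec_calculate_base_parameter data out) := by unfold Spec_calculate_base_parameter; infer_instance

-- ===== CLAIM (what is proved, stated in full; the proofs are below) =====
def Claim_equal_calculate_base_parameter : Prop := ∀ (data : String), Dom_calculate_base_parameter data → Spec_calculate_base_parameter data (calculate_base_parameter data)

-- ===== LEMMAS AND PROOFS =====

-- "data has a duplicate window of length L", as A computes it
def pvDup (s : List Char) (L : Int) : Bool := pvFindTwins (pvBreakIntoSubsets s L)

theorem pvFindTwins_iff (l : List (List Char)) : pvFindTwins l = true ↔ ¬ l.Nodup := by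
  unfold pvFindTwins
  rw [List.any_eq_true, List.nodup_iff_count_le_one]
  constructor
  · rintro ⟨d, hd, hc⟩ h
    simp only [decide_eq_true_eq] at hc
    exact absurd (h d) (by omega)
  · intro h
    push Not at h
    obtain ⟨d, hd⟩ := h
    refine ⟨d, List.count_pos_iff.mp (by omega), by simp; omega⟩

theorem pvHasDupGo_iff (s : List Char) (L : Int) (xs : List Int) (seen : PySem.Set (List Char))
    (hseen : seen.Nodup) :
    pvHasDupGo s L xs seen = true ↔
      ¬ (seen ++ xs.map (fun x => PySem.List.slice s (some x) (some (x + L)))).Nodup := by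
  induction xs generalizing seen with
  | nil => simp [pvHasDupGo, hseen]
  | cons i rest ih =>
    simp only [pvHasDupGo]
    set sub := PySem.List.slice s (some i) (some (i + L)) with hsub
    by_cases hc : PySem.Set.contains seen sub = true
    · rw [if_pos hc]
      have hmem : sub ∈ seen := by
        simpa [PySem.Set.contains, List.contains_iff_mem] using hc
      simp only [true_iff, List.map_cons]
      intro hnd
      rw [List.nodup_append] at hnd
      exact hnd.2.2 sub hmem sub (List.mem_cons_self) rfl
    · rw [if_neg hc]
      have hmem : sub ∉ seen := by
        intro hm
        have : PySem.Set.contains seen sub = true := by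
          simp [PySem.Set.contains, hm]
        exact hc this
      have hadd : PySem.Set.add seen sub = seen ++ [sub] := by
        simp [PySem.Set.add, hmem]
      have hnd' : (seen ++ [sub]).Nodup := by
        rw [List.nodup_append]
        exact ⟨hseen, List.nodup_singleton _, by
          intro a ha b hb hab; simp at hb; subst hb; exact hmem (hab ▸ ha)⟩
      rw [ih _ (by rw [hadd]; exact hnd'), hadd, List.append_assoc, List.singleton_append,
        List.map_cons]

theorem pvHasDup_eq (s : List Char) (L : Int) : pvHasDup s L = pvDup s L := by
  have h1 := pvHasDupGo_iff s L (PySem.List.pyRange 0 ((s.length : Int) - L + 1) 1)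
    PySem.Set.empty List.nodup_nil
  unfold pvHasDup pvDup pvBreakIntoSubsets
  rw [Bool.eq_iff_iff, h1, pvFindTwins_iff]
  simp [PySem.Set.empty]

-- elementwise description of A's subset list
theorem pvSubsets_getElem (s : List Char) (L : Int) (k : Nat)
    (hk : k < (pvBreakIntoSubsets s L).length) (hL : 0 ≤ L) :
    (pvBreakIntoSubsets s L)[k] = (s.drop k).take L.toNat := by
  unfold pvBreakIntoSubsets
  rw [List.getElem_map]
  have hk' : k < (PySem.List.pyRange 0 ((s.length : Int) - L + 1) 1).length := by
    simpa [pvBreakIntoSubsets] using hk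
  rw [PySem.List.getElem_pyRange_one, PySem.List.slice_toNat _ (by omega) (by omega)]
  simp only [zero_add, Int.toNat_natCast]
  congr 1
  omega

theorem pvSubsets_length (s : List Char) (L : Int) :
    (pvBreakIntoSubsets s L).length = ((s.length : Int) - L + 1).toNat := by
  unfold pvBreakIntoSubsets
  rw [List.length_map, PySem.List.length_pyRange_one]
  congr 1; omega

-- monotonicity: a duplicate window of length L+1 yields one of length L
theorem pvDup_mono (s : List Char) (L : Int) (hL : 1 ≤ L)
    (h : pvDup s (L + 1) = true) : pvDup s L = true := by
  unfold pvDup at *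
  rw [pvFindTwins_iff] at *
  rw [List.nodup_iff_getElem?_ne_getElem?] at h
  push Not at h
  obtain ⟨i, j, hij, hj, he⟩ := h
  rw [List.getElem?_eq_getElem (by omega), List.getElem?_eq_getElem hj] at he
  have he' := Option.some_injective _ he
  rw [pvSubsets_getElem s (L+1) i (by omega) (by omega),
      pvSubsets_getElem s (L+1) j hj (by omega)] at he'
  have hlen := pvSubsets_length s (L+1)
  have hlen2 := pvSubsets_length s L
  rw [List.nodup_iff_getElem?_ne_getElem?]
  push Not
  refine ⟨i, j, hij, by omega, ?_⟩
  rw [List.getElem?_eq_getElem (by omega), List.getElem?_eq_getElem (by omega)]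
  congr 1
  rw [pvSubsets_getElem s L i (by omega) (by omega),
      pvSubsets_getElem s L j (by omega) (by omega)]
  have := congrArg (List.take L.toNat) he'
  have hmin : (L + 1).toNat = L.toNat + 1 := by omega
  simpa [List.take_take, Nat.min_def, hmin] using this

theorem pvDup_down (s : List Char) (k m : Int) (hk : 1 ≤ k) (hkm : k ≤ m)
    (h : pvDup s m = true) : pvDup s k = true := by
  have key : ∀ j : Nat, ∀ k : Int, 1 ≤ k → pvDup s (k + j) = true → pvDup s k = true := by
    intro j
    induction j with
    | zero => intro k _ h; simpa using h
    | succ j ih =>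
      intro k hk h
      have harg : (k + ((j + 1 : Nat) : Int)) = (k + j) + 1 := by push_cast; ring
      rw [harg] at h
      exact ih k hk (pvDup_mono s (k + j) (by omega) h)
  have hj : m = k + ((m - k).toNat : Int) := by omega
  exact key (m - k).toNat k hk (by rw [← hj]; exact h)

theorem pvFindTwins_short (l : List (List Char)) (h : l.length ≤ 1) : pvFindTwins l = false := by
  match l with
  | [] => rfl
  | [a] => simp [pvFindTwins]
  | a :: b :: t => simp at h

theorem pvDup_top (s : List Char) : pvDup s (max (s.length : Int) 1) = false := by
  unfold pvDup
  apply pvFindTwins_short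
  rw [pvSubsets_length]
  rcases max_choice ((s.length : Int)) 1 with h | h <;> rw [h] <;> omega

theorem pvALoop_eq_t (s : List Char) (bp : Int)
    (h : pvFindTwins (pvBreakIntoSubsets s bp) = true) :
    pvALoop s bp = pvALoop s (bp + 1) := by
  conv_lhs => rw [pvALoop]
  rw [dif_pos h]

theorem pvALoop_eq_f (s : List Char) (bp : Int)
    (h : ¬ pvFindTwins (pvBreakIntoSubsets s bp) = true) :
    pvALoop s bp = bp := by
  rw [pvALoop, dif_neg h]

theorem pvALoop_spec (s : List Char) (bp : Int) :
    pvDup s (pvALoop s bp) = false ∧ bp ≤ pvALoop s bp ∧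
      ∀ k, bp ≤ k → k < pvALoop s bp → pvDup s k = true := by
  induction bp using pvALoop.induct s with
  | case1 bp h ih =>
    rw [pvALoop_eq_t s bp h]
    obtain ⟨ih0, ih1, ih2⟩ := ih
    refine ⟨ih0, by omega, ?_⟩
    intro k hk1 hk2
    rcases eq_or_lt_of_le hk1 with rfl | hk1'
    · exact h
    · exact ih2 k (by omega) hk2
  | case2 bp h =>
    rw [pvALoop_eq_f s bp h]
    exact ⟨by simpa using h, le_refl _, fun k hk1 hk2 => by omega⟩

theorem pvBLoop_eq_t (s : List Char) (lo hi : Int) (h : lo < hi)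
    (hd : pvHasDup s (PySem.Int.floordiv (lo + hi) 2) = true) :
    pvBLoop s lo hi = pvBLoop s (PySem.Int.floordiv (lo + hi) 2 + 1) hi := by
  conv_lhs => rw [pvBLoop]
  simp only [dif_pos h, hd, if_true]

theorem pvBLoop_eq_f (s : List Char) (lo hi : Int) (h : lo < hi)
    (hd : pvHasDup s (PySem.Int.floordiv (lo + hi) 2) = false) :
    pvBLoop s lo hi = pvBLoop s lo (PySem.Int.floordiv (lo + hi) 2) := by
  conv_lhs => rw [pvBLoop]
  simp only [dif_pos h, hd]
  simp

theorem pvBLoop_eq_n (s : List Char) (lo hi : Int) (h : ¬ lo < hi) : pvBLoop s lo hi = lo := by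
  rw [pvBLoop, dif_neg h]

theorem pvBLoop_spec (s : List Char) (lo hi : Int) : 1 ≤ lo → lo ≤ hi →
    (lo = 1 ∨ pvDup s (lo - 1) = true) → pvDup s hi = false →
    pvDup s (pvBLoop s lo hi) = false ∧
      (pvBLoop s lo hi = 1 ∨ pvDup s (pvBLoop s lo hi - 1) = true) ∧
      1 ≤ pvBLoop s lo hi := by
  induction lo, hi using pvBLoop.induct s with
  | case1 lo hi h mid hd ih =>
    intro h1 hlh hbelow htop
    have hb := PySem.Int.floordiv_two_mid_bounds (le_of_lt h)
    have hlt : PySem.Int.floordiv (lo + hi) 2 < hi :=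
      (PySem.Int.floordiv_lt_iff_lt_mul (a := lo + hi) (b := 2) (q := hi) (by omega)).mpr (by omega)
    rw [pvBLoop_eq_t s lo hi h hd]
    have hdup : pvDup s (PySem.Int.floordiv (lo + hi) 2) = true := by
      rw [← pvHasDup_eq]; exact hd
    exact ih (by omega) (by omega)
      (Or.inr (by rw [show mid + 1 - 1 = mid by ring]; exact hdup)) htop
  | case2 lo hi h mid hd ih =>
    intro h1 hlh hbelow htop
    have hb := PySem.Int.floordiv_two_mid_bounds (le_of_lt h)
    have hd' : pvHasDup s (PySem.Int.floordiv (lo + hi) 2) = false :=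
      Bool.not_eq_true _ ▸ (hd : ¬ pvHasDup s mid = true)
    rw [pvBLoop_eq_f s lo hi h hd']
    have hdup : pvDup s (PySem.Int.floordiv (lo + hi) 2) = false := by
      rw [← pvHasDup_eq]; exact hd'
    exact ih h1 (by omega) hbelow hdup
  | case3 lo hi h =>
    intro h1 hlh hbelow htop
    rw [pvBLoop_eq_n s lo hi h]
    have : lo = hi := by omega
    exact ⟨this ▸ htop, hbelow, h1⟩

-- ===== VERDICT (by name: the statement is the Claim_ definition above) =====
theorem calculate_base_parameter_spec : Claim_equal_calculate_base_parameter := by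
  intro data _
  unfold Spec_calculate_base_parameter calculate_base_parameter calculate_base_parameter_alt
  set s := data.toList with hs
  obtain ⟨hA0, hA1, hA2⟩ := pvALoop_spec s 1
  obtain ⟨hB0, hB1, hB2⟩ := pvBLoop_spec s 1 (max (s.length : Int) 1) le_rfl
    (le_max_right _ _) (Or.inl rfl) (pvDup_top s)
  set rA := pvALoop s 1
  set rB := pvBLoop s 1 (max (s.length : Int) 1)
  rcases lt_trichotomy rA rB with hlt | heq | hgt
  · -- then pvDup s rA = true via rB's lower-interval property
    rcases hB1 with hB1 | hB1
    · omega
    · have : pvDup s rA = true := pvDup_down s rA (rB - 1) hA1 (by omega) hB1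
      rw [hA0] at this; exact absurd this (by simp)
  · exact heq
  · have : pvDup s rB = true := hA2 rB hB2 hgt
    rw [hB0] at this; exact absurd this (by simp)
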